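-- pv_equiv track=rewrite | github.com/MichaelArnoldOwens/practice | find_left_peaks.py | find_left_peaks
-- ===== SOURCE A (Python) =====
-- def find_left_peaks(arr):
--     idx = len(arr) - 1
--     result = []
--     greatest = float('-inf')
--     while idx >= 0:
--         curr_val = arr[idx]
--         if curr_val > greatest:
--             result.insert(0, curr_val)
--             greatest = curr_val
--         idx -= 1
--     return result
-- ===== SOURCE B (Python) =====
-- def find_left_peaks(arr):
--     n = len(arr)
--     suffix = [None] * n
--     m = None
--     for i in range(n - 1, -1, -1):
--         suffix[i] = m
--         m = arr[i] if m is None or arr[i] > m else m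
--     return [arr[i] for i in range(n) if suffix[i] is None or arr[i] > suffix[i]]
-- ===== Notes on version B (the rewrite author's own statement) =====
-- stated objective: alternative
-- what changed: B precomputes an explicit suffix-maximum table in a right-to-left pass and then emits peaks in a forward pass in output order, instead of A's backward scan with a running-max scalar and repeated result.insert(0, ...).
import Mathlib
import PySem

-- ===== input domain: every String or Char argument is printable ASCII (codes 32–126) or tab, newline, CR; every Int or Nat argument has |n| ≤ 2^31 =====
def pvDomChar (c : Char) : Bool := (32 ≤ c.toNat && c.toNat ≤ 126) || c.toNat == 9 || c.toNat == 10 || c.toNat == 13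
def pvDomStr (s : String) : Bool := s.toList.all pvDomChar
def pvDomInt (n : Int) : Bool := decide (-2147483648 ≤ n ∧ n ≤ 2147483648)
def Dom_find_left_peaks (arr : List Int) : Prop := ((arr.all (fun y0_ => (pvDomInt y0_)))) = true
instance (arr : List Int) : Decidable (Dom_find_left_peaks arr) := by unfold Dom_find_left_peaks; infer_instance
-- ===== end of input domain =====

-- B replaces A's backward running-max scan with front-insertions by an explicit suffix-maximum
-- table plus a forward output pass (alternative decomposition; return values proved equal).

-- ===== PORT A =====
-- greatest = float('-inf') is modelled as Option Int with none = -inf;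
-- 'curr_val > greatest' is gtA, true when greatest is none.
def gtA (x : Int) : Option Int → Bool
  | none => true
  | some v => decide (v < x)

-- the while loop: idx runs len-1 .. 0, i.e. the reversed list left to right;
-- result.insert(0, curr_val) is cons onto the accumulated result.
def loopA : List Int → Option Int → List Int → List Int
  | [], _, res => res
  | c :: rest, g, res =>
    if gtA c g then loopA rest (some c) (c :: res) else loopA rest g res

def find_left_peaks (arr : List Int) : List Int :=
  loopA arr.reverse none []

-- ===== PORT B =====
-- 'arr[i] if m is None or arr[i] > m else m'
def upd (x : Int) : Option Int → Int
  | none => x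
  | some v => if v < x then x else v

-- right-to-left pass building the suffix table (suffix[i] = max of arr[i+1:], none if empty)
-- together with the running maximum m; structural recursion from the right end.
def suffB : List Int → List (Int × Option Int) × Option Int
  | [] => ([], none)
  | x :: rest =>
    let p := suffB rest
    ((x, p.2) :: p.1, some (upd x p.2))

-- forward comprehension: keep arr[i] when suffix[i] is None or arr[i] > suffix[i]
def find_left_peaks_alt (arr : List Int) : List Int :=
  (((suffB arr).1.filter (fun p => gtA p.1 p.2)).map Prod.fst)

-- ===== PRECONDITION & SPEC =====
def Spec_find_left_peaks (arr : List Int) (out : List Int) : Prop := out = find_left_peaks_alt arr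
instance (arr : List Int) (out : List Int) : Decidable (Spec_find_left_peaks arr out) := by unfold Spec_find_left_peaks; infer_instance

-- ===== CLAIM (what is proved, stated in full; the proofs are below) =====
def Claim_equal_find_left_peaks : Prop := ∀ (arr : List Int), Dom_find_left_peaks arr → Spec_find_left_peaks arr (find_left_peaks arr)

-- ===== LEMMAS AND PROOFS =====

-- A's loop without the accumulator (result in scan order, reversed at the end)
def revPeaks : List Int → Option Int → List Int
  | [], _ => []
  | c :: rest, g => if gtA c g then c :: revPeaks rest (some c) else revPeaks rest g

-- A's running-max update as a fold step
def stepA (g : Option Int) (c : Int) : Option Int := if gtA c g then some c else g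

-- common reference function: keep x when it beats g and everything after it
def Fg : List Int → Option Int → List Int
  | [], _ => []
  | x :: rest, g =>
    if gtA x g && rest.all (fun y => decide (y < x)) then x :: Fg rest g else Fg rest g

theorem loopA_eq (l : List Int) : ∀ g res, loopA l g res = (revPeaks l g).reverse ++ res := by
  induction l with
  | nil => intro g res; simp [loopA, revPeaks]
  | cons c rest ih =>
    intro g res
    by_cases h : gtA c g = true <;> simp [loopA, revPeaks, h, ih]

theorem gtA_none (x : Int) : gtA x none = true := rfl

theorem gtA_stepA (x c : Int) (g : Option Int) :
    gtA x (stepA g c) = (gtA x g && decide (c < x)) := by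
  cases g with
  | none => simp [gtA, stepA]
  | some v =>
    by_cases h1 : v < c <;> by_cases h2 : c < x <;> by_cases h3 : v < x <;>
      simp [gtA, stepA, h1, h2, h3] <;> omega

theorem gtA_foldl (l : List Int) : ∀ (g : Option Int) (x : Int),
    gtA x (l.foldl stepA g) = (gtA x g && l.all (fun y => decide (y < x))) := by
  induction l with
  | nil => simp
  | cons c rest ih =>
    intro g x
    simp [List.foldl, ih, gtA_stepA]
    by_cases h : gtA x g = true <;> simp [h]

theorem revPeaks_append (a : List Int) : ∀ (b : List Int) (g : Option Int),
    revPeaks (a ++ b) g = revPeaks a g ++ revPeaks b (a.foldl stepA g) := by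
  induction a with
  | nil => simp [revPeaks]
  | cons c rest ih =>
    intro b g
    by_cases h : gtA c g = true <;> simp [revPeaks, h, ih, stepA]

theorem revPeaks_reverse (l : List Int) : ∀ g, revPeaks l.reverse g = (Fg l g).reverse := by
  induction l with
  | nil => intro g; simp [revPeaks, Fg]
  | cons x rest ih =>
    intro g
    have : (x :: rest).reverse = rest.reverse ++ [x] := by simp
    rw [this, revPeaks_append, ih]
    have hc : gtA x (rest.reverse.foldl stepA g)
        = (gtA x g && rest.all (fun y => decide (y < x))) := by
      rw [gtA_foldl, List.all_reverse]
    simp only [revPeaks]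
    rw [hc]
    by_cases h : (gtA x g && rest.all (fun y => decide (y < x))) = true <;>
      simp [Fg, h]

theorem suffB_snd_all (l : List Int) (x : Int) :
    gtA x (suffB l).2 = l.all (fun y => decide (y < x)) := by
  induction l with
  | nil => simp [suffB, gtA]
  | cons c rest ih =>
    simp only [suffB, List.all_cons]
    rw [← ih]
    cases hm : (suffB rest).2 with
    | none => simp [gtA, upd]
    | some v =>
      by_cases h1 : v < c <;> by_cases h2 : c < x <;> by_cases h3 : v < x <;>
        simp [gtA, upd, h1, h2, h3] <;> omega

theorem alt_eq_Fg (l : List Int) : find_left_peaks_alt l = Fg l none := by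
  induction l with
  | nil => simp [find_left_peaks_alt, suffB, Fg]
  | cons x rest ih =>
    by_cases hc : (rest.all (fun y => decide (y < x))) = true <;>
      simp [find_left_peaks_alt, suffB, suffB_snd_all,
        gtA_none, hc, Fg] at ih ⊢ <;> simp [ih]

-- ===== VERDICT (by name: the statement is the Claim_ definition above) =====
theorem find_left_peaks_spec : Claim_equal_find_left_peaks := by
  intro arr _
  show find_left_peaks arr = find_left_peaks_alt arr
  rw [find_left_peaks, loopA_eq, revPeaks_reverse, alt_eq_Fg]
  simp
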